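-- pv_equiv track=rewrite | github.com/greenfox-velox/attilakrupl | break/Python CW practice/denominator.py | commonDenom
-- ===== SOURCE A (Python) =====
-- def commonDenom(lst):
--     result = 1
--     myList = lst
--     for i in range(len(myList)):
--         for num in myList[i]:
--             result *= num
--             for num2 in range(i+1,len(myList)):
--                 if num in myList[num2]:
--                     myList[num2].remove(num)
--     return result
-- ===== SOURCE B (Python) =====
-- def commonDenom(lst):
--     merged = {}
--     for sub in lst:
--         counts = {}
--         for v in sub:
--             counts[v] = counts.get(v, 0) + 1
--         for v, c in counts.items():
--             if c > merged.get(v, 0):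
--                 merged[v] = c
--     result = 1
--     for v, c in merged.items():
--         result *= v ** c
--     return result
-- ===== Notes on version B (the rewrite author's own statement) =====
-- stated objective: faster
-- what changed: Replaces A's mutate-and-rescan (remove each counted element from every later list, with linear membership scans) by a single pass that builds a per-list frequency dict, max-merges them into one table, and returns the product of v**count; A's in-place mutation of the caller's inner lists is dropped (return value only).
import Mathlib
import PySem

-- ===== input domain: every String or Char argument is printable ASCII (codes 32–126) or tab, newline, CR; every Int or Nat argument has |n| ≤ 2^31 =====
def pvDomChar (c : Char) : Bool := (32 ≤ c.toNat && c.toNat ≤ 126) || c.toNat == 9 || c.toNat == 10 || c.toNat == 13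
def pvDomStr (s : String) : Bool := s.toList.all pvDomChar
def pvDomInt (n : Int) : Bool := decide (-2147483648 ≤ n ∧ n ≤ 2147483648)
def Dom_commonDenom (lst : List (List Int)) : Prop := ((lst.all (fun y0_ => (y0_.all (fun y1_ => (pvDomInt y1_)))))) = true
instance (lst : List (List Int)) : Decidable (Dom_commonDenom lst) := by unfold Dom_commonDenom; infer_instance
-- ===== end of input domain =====

-- B replaces A's mutate-and-rescan by a count / max-merge / product pass (equivalence is about the
-- return value only: A mutates the caller's inner lists in place, B does not).

-- ===== PORT A =====
-- myList[num2].remove(num): guarded by the membership test, so remove?'s ValueError case is unreachable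
def pvRemove (xs : List Int) (v : Int) : List Int := (PySem.List.remove? xs v).getD xs

-- 'for num2 in range(i+1, len(myList)): if num in myList[num2]: myList[num2].remove(num)'
def pvInnerA (num : Int) (i n : Nat) (ml : List (List Int)) : List (List Int) :=
  (List.range' (i+1) (n - (i+1))).foldl
    (fun ml j => if num ∈ ml.getD j [] then ml.set j (pvRemove (ml.getD j []) num) else ml) ml

def commonDenom (lst : List (List Int)) : Int :=
  let n := lst.length
  ((List.range n).foldl
    (fun (st : List (List Int) × Int) i =>
      (st.1.getD i []).foldl
        (fun (st : List (List Int) × Int) num => (pvInnerA num i n st.1, st.2 * num)) st)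
    (lst, 1)).2

-- ===== PORT B =====
def commonDenom_alt (lst : List (List Int)) : Int :=
  let merged := lst.foldl
    (fun (merged : PySem.Dict Int Int) sub =>
      let counts := sub.foldl
        (fun (d : PySem.Dict Int Int) v => d.insert v (d.getD v 0 + 1)) PySem.Dict.empty
      counts.items.foldl
        (fun (m : PySem.Dict Int Int) p => if p.2 > m.getD p.1 0 then m.insert p.1 p.2 else m)
        merged)
    PySem.Dict.empty
  merged.items.foldl (fun (r : Int) p => r * p.1 ^ p.2.toNat) 1

-- ===== PRECONDITION & SPEC =====
def Spec_commonDenom (lst : List (List Int)) (out : Int) : Prop := out = commonDenom_alt lst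
instance (lst : List (List Int)) (out : Int) : Decidable (Spec_commonDenom lst out) := by unfold Spec_commonDenom; infer_instance

-- ===== CLAIM (what is proved, stated in full; the proofs are below) =====
def Claim_equal_commonDenom : Prop := ∀ (lst : List (List Int)), Dom_commonDenom lst → Spec_commonDenom lst (commonDenom lst)

-- ===== LEMMAS AND PROOFS =====

-- one Python pass 'if num in y: y.remove(num)'
def pvStep1 (num : Int) (y : List Int) : List Int := if num ∈ y then pvRemove y num else y

-- the cumulative effect on a later list of processing all of x
def pvDiffL (y x : List Int) : List Int := x.foldl (fun y num => pvStep1 num y) y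

-- A's algorithm as head recursion on the outer list
def pvF : List (List Int) → Int
  | [] => 1
  | x :: rest => x.prod * pvF (rest.map (fun y => pvDiffL y x))
termination_by l => l.length
decreasing_by simp

-- max multiplicity of v across the sublists
def pvMxc (v : Int) (L : List (List Int)) : Nat := L.foldr (fun ys m => max (ys.count v) m) 0

-- the common closed form both programs compute
def pvCanon (L : List (List Int)) : Int := ∏ v ∈ L.flatten.toFinset, v ^ pvMxc v L

-- B's per-sublist merge step (identical term to the lambda inside commonDenom_alt)
def pvMergeStep (merged : PySem.Dict Int Int) (sub : List Int) : PySem.Dict Int Int :=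
  let counts := sub.foldl
    (fun (d : PySem.Dict Int Int) v => d.insert v (d.getD v 0 + 1)) PySem.Dict.empty
  counts.items.foldl
    (fun (m : PySem.Dict Int Int) p => if p.2 > m.getD p.1 0 then m.insert p.1 p.2 else m)
    merged

lemma pvMxc_cons (v : Int) (x : List Int) (L : List (List Int)) :
    pvMxc v (x :: L) = max (x.count v) (pvMxc v L) := rfl

lemma count_pvStep1 (num v : Int) (y : List Int) :
    (pvStep1 num y).count v = if num = v then y.count v - 1 else y.count v := by
  unfold pvStep1 pvRemove
  by_cases h : num ∈ y
  · rw [if_pos h, PySem.List.remove?_eq_some_erase y num h]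
    by_cases hv : num = v
    · subst hv; simp [List.count_erase_self]
    · simp [hv, List.count_erase_of_ne (fun e => hv e.symm)]
  · rw [if_neg h]
    by_cases hv : num = v
    · subst hv
      have h0 : y.count num = 0 := List.count_eq_zero.mpr h
      simp [h0]
    · simp [hv]

lemma count_pvDiffL (y x : List Int) (v : Int) :
    (pvDiffL y x).count v = y.count v - x.count v := by
  induction x generalizing y with
  | nil => simp [pvDiffL]
  | cons n x ih =>
    have hstep : pvDiffL y (n :: x) = pvDiffL (pvStep1 n y) x := rfl
    rw [hstep, ih, count_pvStep1]
    rcases eq_or_ne n v with hv | hv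
    · subst hv
      simp only [List.count_cons, beq_self_eq_true, if_true]
      omega
    · simp only [List.count_cons, beq_iff_eq, if_neg hv]
      omega

lemma mem_pvDiffL (a : Int) (y x : List Int) : a ∈ pvDiffL y x → a ∈ y := by
  induction x generalizing y with
  | nil => intro h; simpa [pvDiffL] using h
  | cons n x ih =>
    intro h
    have h' : a ∈ pvDiffL (pvStep1 n y) x := h
    have h2 : a ∈ pvStep1 n y := ih (pvStep1 n y) h'
    unfold pvStep1 pvRemove at h2
    by_cases hm : n ∈ y
    · rw [if_pos hm, PySem.List.remove?_eq_some_erase y n hm] at h2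
      exact List.mem_of_mem_erase (by simpa using h2)
    · simpa [hm] using h2

lemma pvInnerA_step_length (num : Int) (k : Nat) (ml : List (List Int)) :
    (if num ∈ ml.getD k [] then ml.set k (pvRemove (ml.getD k []) num) else ml).length = ml.length := by
  split <;> simp

lemma pvInnerA_foldl_length (num : Int) (L : List Nat) :
    ∀ ml : List (List Int),
      (L.foldl (fun ml j => if num ∈ ml.getD j [] then ml.set j (pvRemove (ml.getD j []) num) else ml) ml).length
        = ml.length := by
  induction L with
  | nil => intro ml; rfl
  | cons k L ih =>
    intro ml
    rw [List.foldl_cons, ih]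
    exact pvInnerA_step_length num k ml

lemma pvInnerA_length (num : Int) (i n : Nat) (ml : List (List Int)) :
    (pvInnerA num i n ml).length = ml.length := pvInnerA_foldl_length num _ ml

lemma pvInnerA_step_getD (num : Int) (k j : Nat) (ml : List (List Int)) :
    ((if num ∈ ml.getD k [] then ml.set k (pvRemove (ml.getD k []) num) else ml).getD j [])
      = if j = k then pvStep1 num (ml.getD j []) else ml.getD j [] := by
  by_cases hjk : j = k
  · subst hjk
    by_cases hm : num ∈ ml.getD j []
    · have hlt : j < ml.length := by
        by_contra hge
        rw [List.getD_eq_default _ _ (le_of_not_gt (fun h => hge h))] at hm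
        simp at hm
      rw [if_pos hm, if_pos rfl]
      simp only [pvStep1, if_pos hm]
      rw [List.getD_eq_getElem?_getD, List.getElem?_set_self hlt, Option.getD_some]
    · rw [if_neg hm, if_pos rfl]
      simp only [pvStep1, if_neg hm]
  · rw [if_neg hjk]
    by_cases hm : num ∈ ml.getD k []
    · rw [if_pos hm]
      rw [List.getD_eq_getElem?_getD, List.getElem?_set_ne (fun e => hjk e.symm),
        ← List.getD_eq_getElem?_getD]
    · rw [if_neg hm]

lemma pvInnerA_foldl_getD (num : Int) (L : List Nat) :
    L.Nodup → ∀ (ml : List (List Int)) (j : Nat),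
      (L.foldl (fun ml j => if num ∈ ml.getD j [] then ml.set j (pvRemove (ml.getD j []) num) else ml) ml).getD j []
        = if j ∈ L then pvStep1 num (ml.getD j []) else ml.getD j [] := by
  induction L with
  | nil => intro _ ml j; simp
  | cons k L ih =>
    intro hL ml j
    obtain ⟨hk, hL'⟩ := List.nodup_cons.mp hL
    rw [List.foldl_cons, ih hL']
    rw [pvInnerA_step_getD]
    by_cases hjk : j = k
    · subst hjk
      rw [if_neg hk, if_pos rfl, if_pos (List.mem_cons_self)]
    · rw [if_neg hjk]
      by_cases hjL : j ∈ L
      · rw [if_pos hjL, if_pos (List.mem_cons_of_mem _ hjL)]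
      · rw [if_neg hjL, if_neg (by simp [hjk, hjL])]

lemma pvInnerA_getD (num : Int) (i n : Nat) (ml : List (List Int)) (j : Nat) :
    (pvInnerA num i n ml).getD j []
      = if i + 1 ≤ j ∧ j < n then pvStep1 num (ml.getD j []) else ml.getD j [] := by
  unfold pvInnerA
  rw [pvInnerA_foldl_getD num _ List.nodup_range' ml j]
  congr 1
  simp only [List.mem_range'_1, eq_iff_iff]
  omega

lemma pvInnerA_eq (num : Int) (i n : Nat) (ml : List (List Int))
    (hml : ml.length = n) (hi : i < n) :
    pvInnerA num i n ml = ml.take (i+1) ++ (ml.drop (i+1)).map (pvStep1 num) := by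
  have hlen : (pvInnerA num i n ml).length = n := by rw [pvInnerA_length, hml]
  have hlenR : (ml.take (i+1) ++ (ml.drop (i+1)).map (pvStep1 num)).length = n := by
    simp [hml]; omega
  apply List.ext_getElem (by omega)
  intro j hj1 hj2
  have hjn : j < n := by omega
  have hgl : (pvInnerA num i n ml)[j] = (pvInnerA num i n ml).getD j [] := by
    rw [List.getD_eq_getElem _ _ (by omega)]
  rw [hgl, pvInnerA_getD]
  have htl : (ml.take (i+1)).length = i + 1 := by simp [hml]; omega
  by_cases hji : j ≤ i
  · rw [if_neg (by omega)]
    rw [List.getElem_append_left (by omega)]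
    rw [List.getElem_take, List.getD_eq_getElem _ _ (by omega)]
  · rw [if_pos (by omega)]
    rw [List.getElem_append_right (by omega)]
    simp only [List.getElem_map, List.getElem_drop]
    rw [List.getD_eq_getElem _ _ (by omega)]
    congr 2
    omega

lemma pvNumsFold (i n : Nat) (nums : List Int) :
    ∀ (ml : List (List Int)) (r : Int), ml.length = n → i < n →
      nums.foldl (fun (st : List (List Int) × Int) num => (pvInnerA num i n st.1, st.2 * num)) (ml, r)
        = (ml.take (i+1) ++ (ml.drop (i+1)).map (fun y => pvDiffL y nums), r * nums.prod) := by
  induction nums with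
  | nil =>
    intro ml r hml hi
    simp [pvDiffL, List.take_append_drop]
  | cons num nums ih =>
    intro ml r hml hi
    rw [List.foldl_cons]
    have h1 : pvInnerA num i n ml = ml.take (i+1) ++ (ml.drop (i+1)).map (pvStep1 num) :=
      pvInnerA_eq num i n ml hml hi
    set ml' := ml.take (i+1) ++ (ml.drop (i+1)).map (pvStep1 num) with hml'def
    have htl : (ml.take (i+1)).length = i + 1 := by simp [hml]; omega
    have hlen' : ml'.length = n := by simp [hml'def, hml]; omega
    have h2 := ih ml' (r * num) hlen' hi
    simp only [h1, h2]
    have htake : ml'.take (i+1) = ml.take (i+1) := by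
      rw [hml'def, List.take_left' htl]
    have hdrop : ml'.drop (i+1) = (ml.drop (i+1)).map (pvStep1 num) := by
      rw [hml'def, List.drop_left' htl]
    rw [htake, hdrop, List.map_map]
    rw [List.prod_cons]
    refine congrArg₂ Prod.mk ?_ (by ring)
    congr 1

lemma pvOuter (n : Nat) : ∀ (m k : Nat) (ml : List (List Int)) (r : Int), m = n - k → ml.length = n →
    ((List.range' k (n-k)).foldl
      (fun (st : List (List Int) × Int) i =>
        (st.1.getD i []).foldl
          (fun (st : List (List Int) × Int) num => (pvInnerA num i n st.1, st.2 * num)) st)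
      (ml, r)).2 = r * pvF (ml.drop k) := by
  intro m
  induction m with
  | zero =>
    intro k ml r hm hml
    have hk : n - k = 0 := hm.symm
    have hkn : ml.length ≤ k := by omega
    rw [hk]
    simp [List.drop_eq_nil_of_le hkn, pvF]
  | succ m ih =>
    intro k ml r hm hml
    have hkn : k < n := by omega
    have hrs : n - k = m + 1 := hm.symm
    rw [hrs, List.range'_succ, List.foldl_cons]
    have hnums := pvNumsFold k n (ml.getD k []) ml r hml hkn
    simp only [hnums]
    have hml' : (ml.take (k+1) ++ (ml.drop (k+1)).map (fun y => pvDiffL y (ml.getD k []))).length = n := by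
      simp [hml]; omega
    have hrange : m = n - (k+1) := by omega
    have := ih (k+1) (ml.take (k+1) ++ (ml.drop (k+1)).map (fun y => pvDiffL y (ml.getD k []))) (r * (ml.getD k []).prod) hrange hml'
    rw [show n - (k+1) = m from by omega] at this
    rw [this]
    have htl : (ml.take (k+1)).length = k + 1 := by simp [hml]; omega
    rw [List.drop_left' htl]
    have hdk : ml.drop k = ml[k] :: ml.drop (k+1) := List.drop_eq_getElem_cons (by omega)
    rw [hdk, pvF]
    have hgd : ml.getD k [] = ml[k] := List.getD_eq_getElem _ _ (by omega)
    rw [hgd]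
    ring

lemma commonDenom_eq_pvF (lst : List (List Int)) : commonDenom lst = pvF lst := by
  have h := pvOuter lst.length lst.length 0 lst 1 (by omega) rfl
  simp only [Nat.sub_zero, List.drop_zero, one_mul] at h
  show ((List.range lst.length).foldl
    (fun (st : List (List Int) × Int) i =>
      (st.1.getD i []).foldl
        (fun (st : List (List Int) × Int) num => (pvInnerA num i lst.length st.1, st.2 * num)) st)
    (lst, 1)).2 = pvF lst
  rw [List.range_eq_range']
  exact h

lemma mem_flatten_iff_mxc_pos (v : Int) (L : List (List Int)) :
    v ∈ L.flatten ↔ 0 < pvMxc v L := by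
  induction L with
  | nil => simp [pvMxc]
  | cons x L ih =>
    simp only [List.flatten_cons, List.mem_append, pvMxc_cons, lt_max_iff]
    rw [← ih, List.count_pos_iff]

lemma pvMxc_map_diff (v : Int) (x : List Int) (rest : List (List Int)) :
    pvMxc v (rest.map (fun y => pvDiffL y x)) = pvMxc v rest - x.count v := by
  induction rest with
  | nil => simp [pvMxc]
  | cons y rest ih =>
    simp only [List.map_cons, pvMxc_cons, ih, count_pvDiffL]
    omega

lemma pvF_eq_pvCanon (L : List (List Int)) : pvF L = pvCanon L := by
  suffices H : ∀ (n : Nat) (L : List (List Int)), L.length = n → pvF L = pvCanon L from H _ L rfl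
  intro n
  induction n using Nat.strong_induction_on with
  | _ n ihn =>
  intro L hL
  cases L with
  | nil => simp [pvF, pvCanon, pvMxc]
  | cons x rest =>
    rw [pvF]
    have hlen : (rest.map (fun y => pvDiffL y x)).length < n := by
      simp at hL ⊢; omega
    rw [ihn _ hlen _ rfl]
    unfold pvCanon
    set rest' := rest.map (fun y => pvDiffL y x) with hrest'
    have hsub1 : x.toFinset ⊆ (x :: rest).flatten.toFinset := by
      intro v hv
      simp only [List.mem_toFinset, List.flatten_cons, List.mem_append] at *
      exact Or.inl hv
    have hsub2 : rest'.flatten.toFinset ⊆ (x :: rest).flatten.toFinset := by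
      intro v hv
      simp only [List.mem_toFinset, List.flatten_cons, List.mem_append, List.mem_flatten] at *
      obtain ⟨y', hy', hvy'⟩ := hv
      rw [hrest'] at hy'
      simp only [List.mem_map] at hy'
      obtain ⟨y, hy, rfl⟩ := hy'
      exact Or.inr ⟨y, hy, mem_pvDiffL v y x hvy'⟩
    have hexp : ∀ v ∈ (x :: rest).flatten.toFinset,
        v ^ pvMxc v (x :: rest) = v ^ x.count v * v ^ pvMxc v rest' := by
      intro v _
      rw [← pow_add]
      congr 1
      rw [hrest', pvMxc_map_diff, pvMxc_cons]
      omega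
    rw [Finset.prod_congr rfl hexp, Finset.prod_mul_distrib]
    congr 1
    · rw [Finset.prod_list_count x]
      refine Finset.prod_subset hsub1 ?_
      intro v _ hv
      simp only [List.mem_toFinset] at hv
      rw [List.count_eq_zero.mpr hv, pow_zero]
    · refine Finset.prod_subset hsub2 ?_
      intro v _ hv
      simp only [List.mem_toFinset] at hv
      have h0 : pvMxc v rest' = 0 := by
        have := (mem_flatten_iff_mxc_pos v rest').not.mp hv
        omega
      rw [h0, pow_zero]

lemma pvMergeFold_getD (c : Int → Int) :
    ∀ (S : List Int), S.Nodup → ∀ (m : PySem.Dict Int Int) (v : Int),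
      (S.foldl (fun m k => if c k > m.getD k 0 then m.insert k (c k) else m) m).getD v 0
        = if v ∈ S ∧ c v > m.getD v 0 then c v else m.getD v 0 := by
  intro S
  induction S with
  | nil => intro _ m v; simp
  | cons k S ih =>
    intro hS m v
    obtain ⟨hk, hS'⟩ := List.nodup_cons.mp hS
    rw [List.foldl_cons, ih hS']
    by_cases hvk : v = k
    · subst hvk
      rw [if_neg (by simp [hk])]
      by_cases hc : c v > m.getD v 0
      · rw [if_pos hc, PySem.Dict.getD_insert]
        rw [if_pos rfl, if_pos ⟨List.mem_cons_self, hc⟩]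
      · rw [if_neg hc, if_neg (by simp [hc])]
    · have hgd : (if c k > m.getD k 0 then m.insert k (c k) else m).getD v 0 = m.getD v 0 := by
        by_cases hc : c k > m.getD k 0
        · rw [if_pos hc, PySem.Dict.getD_insert, if_neg hvk]
        · rw [if_neg hc]
      rw [hgd]
      have hmm : (v ∈ k :: S ∧ c v > m.getD v 0) ↔ (v ∈ S ∧ c v > m.getD v 0) := by
        simp [List.mem_cons, hvk]
      rw [if_congr hmm rfl rfl]

lemma pvMergeFold_memKeys (c : Int → Int) :
    ∀ (S : List Int), S.Nodup → ∀ (m : PySem.Dict Int Int) (v : Int),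
      (v ∈ (S.foldl (fun m k => if c k > m.getD k 0 then m.insert k (c k) else m) m).keys
        ↔ v ∈ m.keys ∨ (v ∈ S ∧ c v > m.getD v 0)) := by
  intro S
  induction S with
  | nil => intro _ m v; simp
  | cons k S ih =>
    intro hS m v
    obtain ⟨hk, hS'⟩ := List.nodup_cons.mp hS
    rw [List.foldl_cons, ih hS']
    by_cases hvk : v = k
    · subst hvk
      have hvS : v ∉ S := hk
      by_cases hc : c v > m.getD v 0
      · rw [if_pos hc]
        simp only [PySem.Dict.mem_keys_insert, List.mem_cons, hvS, false_and, or_false,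
          true_or, hc, and_true]
        tauto
      · rw [if_neg hc]
        simp only [List.mem_cons, hvS, false_and, or_false, true_and]
        tauto
    · have hgd : (if c k > m.getD k 0 then m.insert k (c k) else m).getD v 0 = m.getD v 0 := by
        by_cases hc : c k > m.getD k 0
        · rw [if_pos hc, PySem.Dict.getD_insert, if_neg hvk]
        · rw [if_neg hc]
      have hmem : v ∈ (if c k > m.getD k 0 then m.insert k (c k) else m).keys ↔ v ∈ m.keys := by
        by_cases hc : c k > m.getD k 0
        · rw [if_pos hc, PySem.Dict.mem_keys_insert]; simp [hvk]
        · rw [if_neg hc]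
      rw [hgd, hmem]
      simp [List.mem_cons, hvk]

lemma pvMergeFold_nodup (c : Int → Int) (S : List Int) :
    ∀ (m : PySem.Dict Int Int), m.keys.Nodup →
      (S.foldl (fun m k => if c k > m.getD k 0 then m.insert k (c k) else m) m).keys.Nodup := by
  induction S with
  | nil => intro m hm; exact hm
  | cons k S ih =>
    intro m hm
    rw [List.foldl_cons]
    apply ih
    by_cases hc : c k > m.getD k 0
    · rw [if_pos hc]; exact PySem.Dict.nodup_keys_insert m k (c k) hm
    · rw [if_neg hc]; exact hm

lemma pvMergeStep_spec (m : PySem.Dict Int Int) (sub : List Int) (f : Int → Nat)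
    (hnd : m.keys.Nodup) (hg : ∀ v, m.getD v 0 = (f v : Int)) (hk : ∀ v, v ∈ m.keys ↔ 0 < f v) :
    (pvMergeStep m sub).keys.Nodup
      ∧ (∀ v, (pvMergeStep m sub).getD v 0 = ((max (sub.count v) (f v) : Nat) : Int))
      ∧ (∀ v, v ∈ (pvMergeStep m sub).keys ↔ 0 < max (sub.count v) (f v)) := by
  have hcnt : sub.foldl (fun (d : PySem.Dict Int Int) v => d.insert v (d.getD v 0 + 1)) PySem.Dict.empty
      = PySem.Dict.counter sub := PySem.Dict.foldl_insert_getD_add_one_eq_counter sub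
  have hms : pvMergeStep m sub
      = (PySem.Set.ofList sub).foldl
          (fun (m : PySem.Dict Int Int) k =>
            if ((sub.count k : Int)) > m.getD k 0 then m.insert k ((sub.count k : Int)) else m) m := by
    show ((sub.foldl (fun (d : PySem.Dict Int Int) v => d.insert v (d.getD v 0 + 1)) PySem.Dict.empty).items.foldl
      (fun (m : PySem.Dict Int Int) p => if p.2 > m.getD p.1 0 then m.insert p.1 p.2 else m) m) = _
    rw [hcnt, PySem.Dict.items_counter, List.foldl_map]
  have hS : (PySem.Set.ofList sub).Nodup := PySem.Set.nodup_ofList sub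
  refine ⟨?_, fun v => ?_, fun v => ?_⟩
  · rw [hms]; exact pvMergeFold_nodup _ _ m hnd
  · rw [hms, pvMergeFold_getD (fun k => ((sub.count k : Int))) _ hS m v, hg v]
    by_cases hvs : v ∈ sub
    · have hvS : v ∈ PySem.Set.ofList sub := (PySem.Set.mem_ofList sub v).mpr hvs
      by_cases hcc : ((sub.count v : Int)) > (f v : Int)
      · rw [if_pos ⟨hvS, hcc⟩]; omega
      · rw [if_neg (by tauto)]; omega
    · have h0 : sub.count v = 0 := List.count_eq_zero.mpr hvs
      have hvS : v ∉ PySem.Set.ofList sub := fun h => hvs ((PySem.Set.mem_ofList sub v).mp h)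
      rw [if_neg (by tauto)]
      omega
  · rw [hms, pvMergeFold_memKeys (fun k => ((sub.count k : Int))) _ hS m v, hk v, hg v]
    by_cases hvs : v ∈ sub
    · have hvS : v ∈ PySem.Set.ofList sub := (PySem.Set.mem_ofList sub v).mpr hvs
      have hcp : 0 < sub.count v := List.count_pos_iff.mpr hvs
      constructor
      · rintro (h | ⟨_, h⟩) <;> omega
      · intro h
        by_cases hgt : ((sub.count v : Int)) > (f v : Int)
        · exact Or.inr ⟨hvS, hgt⟩
        · left; omega
    · have h0 : sub.count v = 0 := List.count_eq_zero.mpr hvs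
      have hvS : v ∉ PySem.Set.ofList sub := fun h => hvs ((PySem.Set.mem_ofList sub v).mp h)
      constructor
      · rintro (h | ⟨hin, _⟩)
        · omega
        · exact absurd hin hvS
      · intro h; left; omega

lemma pvMergedInv (L : List (List Int)) :
    ∀ (m : PySem.Dict Int Int) (f : Int → Nat), m.keys.Nodup →
      (∀ v, m.getD v 0 = (f v : Int)) → (∀ v, v ∈ m.keys ↔ 0 < f v) →
      ((L.foldl pvMergeStep m).keys.Nodup
        ∧ (∀ v, (L.foldl pvMergeStep m).getD v 0 = ((max (f v) (pvMxc v L) : Nat) : Int))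
        ∧ (∀ v, v ∈ (L.foldl pvMergeStep m).keys ↔ 0 < max (f v) (pvMxc v L))) := by
  induction L with
  | nil =>
    intro m f hnd hg hk
    refine ⟨hnd, fun v => ?_, fun v => ?_⟩
    · simp [pvMxc, hg v]
    · simp [pvMxc, hk v]
  | cons sub L ih =>
    intro m f hnd hg hk
    rw [List.foldl_cons]
    obtain ⟨hnd', hg', hk'⟩ := pvMergeStep_spec m sub f hnd hg hk
    obtain ⟨h1, h2, h3⟩ := ih (pvMergeStep m sub) (fun v => max (sub.count v) (f v)) hnd' hg' hk'
    refine ⟨h1, fun v => ?_, fun v => ?_⟩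
    · rw [h2 v]
      congr 1
      rw [pvMxc_cons]
      omega
    · rw [h3 v, pvMxc_cons]
      constructor <;> (intro h; omega)

lemma pvFoldlMul (l : List Int) (g : Int → Int) :
    ∀ r : Int, l.foldl (fun r k => r * g k) r = r * (l.map g).prod := by
  induction l with
  | nil => intro r; simp
  | cons k l ih => intro r; rw [List.foldl_cons, ih, List.map_cons, List.prod_cons]; ring

lemma pvItemsProd (d : PySem.Dict Int Int) (hn : d.keys.Nodup) :
    d.items.foldl (fun (r : Int) p => r * p.1 ^ p.2.toNat) 1
      = ∏ v ∈ d.keys.toFinset, v ^ (d.getD v 0).toNat := by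
  rw [PySem.Dict.items_eq_map_keys d hn 0, List.foldl_map]
  show d.keys.foldl (fun r k => r * k ^ (d.getD k 0).toNat) 1 = _
  rw [pvFoldlMul d.keys (fun k => k ^ (d.getD k 0).toNat) 1, one_mul]
  exact (List.prod_toFinset _ hn).symm

lemma commonDenom_alt_eq_pvCanon (lst : List (List Int)) : commonDenom_alt lst = pvCanon lst := by
  show (lst.foldl pvMergeStep PySem.Dict.empty).items.foldl (fun (r : Int) p => r * p.1 ^ p.2.toNat) 1 = pvCanon lst
  obtain ⟨hnd, hg, hk⟩ := pvMergedInv lst PySem.Dict.empty (fun _ => 0)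
    (by rw [PySem.Dict.keys_empty]; exact List.nodup_nil)
    (fun v => by rw [PySem.Dict.getD_empty]; rfl)
    (fun v => by rw [PySem.Dict.keys_empty]; simp)
  rw [pvItemsProd _ hnd]
  unfold pvCanon
  have hfin : (lst.foldl pvMergeStep PySem.Dict.empty).keys.toFinset = lst.flatten.toFinset := by
    apply Finset.ext
    intro v
    simp only [List.mem_toFinset, hk v, mem_flatten_iff_mxc_pos]
    omega
  rw [hfin]
  apply Finset.prod_congr rfl
  intro v _
  rw [hg v]
  simp

-- ===== VERDICT (by name: the statement is the Claim_ definition above) =====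
theorem commonDenom_spec : Claim_equal_commonDenom := by
  intro lst _
  unfold Spec_commonDenom
  rw [commonDenom_eq_pvF, pvF_eq_pvCanon, commonDenom_alt_eq_pvCanon]
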